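-- pv_equiv track=rewrite | github.com/bbislungo/VC-Snapshot | VC_Snapshot.py | stage_score
-- ===== SOURCE A (Python) =====
-- from typing import Dict, List, Optional
--
-- ALL_STAGES = ["Pre-Seed","Seed","Series A","Series B+"]
--
-- def stage_score(company_stage: str, vc_stages: List[str]) -> (int, str):
--     s = ALL_STAGES
--     idx = {s[i]: i for i in range(len(s))}
--     if company_stage in vc_stages:
--         return 100, "Stage matches VC focus"
--     if company_stage in idx:
--         for st in vc_stages:
--             if st in idx and abs(idx[st]-idx[company_stage])==1:
--                 return 70, "Adjacent stage"
--     return 40, "Stage misaligned"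
-- ===== SOURCE B (Python) =====
-- ALL_STAGES = ["Pre-Seed", "Seed", "Series A", "Series B+"]
--
-- _MSG = {100: "Stage matches VC focus", 70: "Adjacent stage", 40: "Stage misaligned"}
--
--
-- def _pair_score(c, ci, st):
--     """Score of one (company stage, vc stage) pair; ci = company's index or None."""
--     if c == st:
--         return 100
--     if ci is not None and st in ALL_STAGES and abs(ci - ALL_STAGES.index(st)) == 1:
--         return 70
--     return 40
--
--
-- def stage_score(company_stage, vc_stages):
--     try:
--         ci = ALL_STAGES.index(company_stage)
--     except ValueError:
--         ci = None
--     best = max((_pair_score(company_stage, ci, st) for st in vc_stages), default=40)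
--     return best, _MSG[best]
-- ===== Notes on version B (the rewrite author's own statement) =====
-- stated objective: alternative
-- what changed: B recasts the branch chain as a max-reduction: each vc stage gets a pairwise score (100 exact match, 70 adjacent, 40 otherwise) and the answer is the maximum of these scores (default 40) with its message looked up in a score-to-message table, instead of A's staged membership test followed by a dict-index adjacency scan.
import Mathlib
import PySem

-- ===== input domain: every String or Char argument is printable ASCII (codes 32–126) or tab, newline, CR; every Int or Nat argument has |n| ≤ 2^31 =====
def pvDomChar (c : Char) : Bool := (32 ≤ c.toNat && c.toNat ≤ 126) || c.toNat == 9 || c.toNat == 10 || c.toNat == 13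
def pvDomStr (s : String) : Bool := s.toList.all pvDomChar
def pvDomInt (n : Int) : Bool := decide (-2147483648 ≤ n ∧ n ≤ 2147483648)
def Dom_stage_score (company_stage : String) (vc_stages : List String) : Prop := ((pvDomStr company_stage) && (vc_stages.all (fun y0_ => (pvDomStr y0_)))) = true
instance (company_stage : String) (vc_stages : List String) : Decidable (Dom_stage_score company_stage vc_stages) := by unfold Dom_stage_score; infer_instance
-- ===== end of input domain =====

-- B replaces A's branch chain (membership test, then dict-index adjacency scan) by a
-- max-reduction of pairwise scores with a score-to-message table; alternative, same cost.

-- ===== PORT A =====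
def ALL_STAGES : List String := ["Pre-Seed", "Seed", "Series A", "Series B+"]

-- the dict comprehension {s[i]: i for i in range(len(s))}; i is always in range, so getD "" never fires
def idxA : PySem.Dict String Int :=
  (PySem.List.pyRange 0 (ALL_STAGES.length : Int) 1).foldl
    (fun d i => d.insert ((PySem.List.pyGet? ALL_STAGES i).getD "") i) PySem.Dict.empty

-- the 'for st in vc_stages' loop: first adjacent stage returns (70, …), otherwise none
def stageLoopA (idx : PySem.Dict String Int) (ci : Int) : List String → Option (Int × String)
  | [] => none
  | st :: rest =>
    match idx.get? st with
    | some j => if (j - ci).natAbs = 1 then some (70, "Adjacent stage") else stageLoopA idx ci rest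
    | none => stageLoopA idx ci rest

def stage_score (company_stage : String) (vc_stages : List String) : Int × String :=
  let idx := idxA
  if vc_stages.contains company_stage then (100, "Stage matches VC focus")
  else
    match idx.get? company_stage with
    | some ci =>
      match stageLoopA idx ci vc_stages with
      | some r => r
      | none => (40, "Stage misaligned")
    | none => (40, "Stage misaligned")

-- ===== PORT B =====
-- the _MSG score-to-message table
def MSG : PySem.Dict Int String :=
  PySem.Dict.ofList [(100, "Stage matches VC focus"), (70, "Adjacent stage"), (40, "Stage misaligned")]

-- _pair_score; the 'and' chain with the membership-guarded .index is the nested match/ifs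
def pairScoreB (c : String) (ci : Option Nat) (st : String) : Int :=
  if c = st then 100
  else
    match ci with
    | some i =>
      if ALL_STAGES.contains st then
        match PySem.List.index? ALL_STAGES st with
        | some j => if ((i : Int) - (j : Int)).natAbs = 1 then 70 else 40
        | none => 40  -- unreachable: contains guarantees index? is some
      else 40
    | none => 40

def stage_score_alt (company_stage : String) (vc_stages : List String) : Int × String :=
  -- the try/except around .index is index? (ValueError = none)
  let ci := PySem.List.index? ALL_STAGES company_stage
  -- max(generator, default=40) is max? with getD 40
  let best := (PySem.List.max? (vc_stages.map (pairScoreB company_stage ci)) (fun x => x)).getD 40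
  -- _MSG[best]: best is always one of the table's keys, so getD "" never fires
  (best, (MSG.get? best).getD "")

-- ===== PRECONDITION & SPEC =====
def Spec_stage_score (company_stage : String) (vc_stages : List String) (out : Int × String) : Prop := out = stage_score_alt company_stage vc_stages
instance (company_stage : String) (vc_stages : List String) (out : Int × String) : Decidable (Spec_stage_score company_stage vc_stages out) := by unfold Spec_stage_score; infer_instance

-- ===== CLAIM (what is proved, stated in full; the proofs are below) =====
def Claim_equal_stage_score : Prop := ∀ (company_stage : String) (vc_stages : List String), Dom_stage_score company_stage vc_stages → Spec_stage_score company_stage vc_stages (stage_score company_stage vc_stages)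

-- ===== LEMMAS AND PROOFS =====

theorem get_idxA (st : String) :
    idxA.get? st =
      if st = "Pre-Seed" then some 0
      else if st = "Seed" then some 1
      else if st = "Series A" then some 2
      else if st = "Series B+" then some 3
      else none := by
  have h : idxA = PySem.Dict.mk
      [("Pre-Seed", (0 : Int)), ("Seed", 1), ("Series A", 2), ("Series B+", 3)] := by decide
  rw [h]
  split_ifs with h1 h2 h3 h4
  · subst h1; rfl
  · subst h2; rfl
  · subst h3; rfl
  · subst h4; rfl
  · have e1 : (("Pre-Seed" : String) == st) = false := beq_eq_false_iff_ne.2 (fun e => h1 e.symm)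
    have e2 : (("Seed" : String) == st) = false := beq_eq_false_iff_ne.2 (fun e => h2 e.symm)
    have e3 : (("Series A" : String) == st) = false := beq_eq_false_iff_ne.2 (fun e => h3 e.symm)
    have e4 : (("Series B+" : String) == st) = false := beq_eq_false_iff_ne.2 (fun e => h4 e.symm)
    simp [PySem.Dict.get?_mk_cons, e1, e2, e3, e4]
    rfl

theorem index_ALL (st : String) :
    PySem.List.index? ALL_STAGES st =
      if st = "Pre-Seed" then some 0
      else if st = "Seed" then some 1
      else if st = "Series A" then some 2
      else if st = "Series B+" then some 3
      else none := by
  split_ifs with h1 h2 h3 h4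
  · subst h1; decide
  · subst h2; decide
  · subst h3; decide
  · subst h4; decide
  · rw [PySem.List.index?_eq_none_iff]
    simp [ALL_STAGES, h1, h2, h3, h4]

-- the adjacency test A applies to one vc stage, given the company stage's index ci
def adjA (ci : Int) (st : String) : Bool :=
  match idxA.get? st with
  | some j => (j - ci).natAbs == 1
  | none => false

theorem stageLoopA_eq (ci : Int) (vs : List String) :
    stageLoopA idxA ci vs =
      if vs.any (adjA ci) then some (70, "Adjacent stage") else none := by
  induction vs with
  | nil => rfl
  | cons st rest ih =>
    rw [stageLoopA]
    cases h : idxA.get? st with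
    | none => simp [List.any_cons, adjA, h, ih]
    | some j =>
      by_cases hj : (j - ci).natAbs = 1 <;>
        simp [List.any_cons, adjA, h, hj, ih]

-- proof-side abbreviation: B's pairwise score with the company's index filled in
def pairScore (c s : String) : Int := pairScoreB c (PySem.List.index? ALL_STAGES c) s

-- the value B's max-reduction computes, characterized by the two 'any' conditions
def Mval (cs : String) (vs : List String) : Int :=
  if vs.any (fun st => cs == st) then 100
  else if vs.any (fun st => pairScore cs st == 70) then 70 else 40

theorem pairScore_cases (cs st : String) :
    pairScore cs st = 100 ∧ cs = st ∨ pairScore cs st = 70 ∧ cs ≠ st ∨ pairScore cs st = 40 ∧ cs ≠ st := by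
  unfold pairScore pairScoreB
  by_cases h : cs = st
  · simp [h]
  · simp only [h, if_false]
    cases PySem.List.index? ALL_STAGES cs with
    | none => simp [h]
    | some i =>
      by_cases hm : st ∈ ALL_STAGES
      · cases PySem.List.index? ALL_STAGES st with
        | none => simp [List.contains_eq_mem, hm, h]
        | some j =>
          by_cases hj : ((i : Int) - (j : Int)).natAbs = 1 <;>
            simp [List.contains_eq_mem, hm, hj, h]
      · simp [List.contains_eq_mem, hm, h]

theorem foldl_max_Mval (cs : String) (vs : List String) :
    ∀ a : Int, 40 ≤ a → (vs.map (pairScore cs)).foldl max a = max a (Mval cs vs) := by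
  induction vs with
  | nil => intro a ha; simp [Mval]; omega
  | cons st rest ih =>
    intro a ha
    have hp := pairScore_cases cs st
    have h40 : 40 ≤ max a (pairScore cs st) := le_max_left _ _ |>.trans' ha |>.trans (le_refl _)
    simp only [List.map_cons, List.foldl_cons]
    rw [ih (max a (pairScore cs st)) (by rcases hp with ⟨h, _⟩ | ⟨h, _⟩ | ⟨h, _⟩ <;> omega)]
    unfold Mval
    simp only [List.any_cons]
    rcases hp with ⟨hv, he⟩ | ⟨hv, hne⟩ | ⟨hv, hne⟩
    · subst he
      simp [hv]
      split_ifs <;> omega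
    · have h1 : (cs == st) = false := beq_eq_false_iff_ne.2 hne
      simp [h1, hv]
      split_ifs <;> omega
    · have h1 : (cs == st) = false := beq_eq_false_iff_ne.2 hne
      simp [h1, hv]
      split_ifs <;> omega

theorem best_eq_Mval (cs : String) (vs : List String) :
    (PySem.List.max? (vs.map (pairScore cs)) (fun x => x)).getD 40 = Mval cs vs := by
  cases vs with
  | nil => simp [Mval, PySem.List.max?]
  | cons st rest =>
    simp only [List.map_cons]
    rw [PySem.List.max?_id_cons, Option.getD_some]
    have hp := pairScore_cases cs st
    have h40 : (40 : Int) ≤ pairScore cs st := by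
      rcases hp with ⟨h, _⟩ | ⟨h, _⟩ | ⟨h, _⟩ <;> omega
    rw [foldl_max_Mval cs rest (pairScore cs st) h40]
    unfold Mval
    simp only [List.any_cons]
    rcases hp with ⟨hv, he⟩ | ⟨hv, hne⟩ | ⟨hv, hne⟩
    · subst he
      simp [hv]
      split_ifs <;> omega
    · have h1 : (cs == st) = false := beq_eq_false_iff_ne.2 hne
      simp [h1, hv]
      split_ifs <;> omega
    · have h1 : (cs == st) = false := beq_eq_false_iff_ne.2 hne
      simp [h1, hv]
      split_ifs <;> omega

theorem alt_eq (cs : String) (vs : List String) :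
    stage_score_alt cs vs = (Mval cs vs, (MSG.get? (Mval cs vs)).getD "") := by
  have h : vs.map (pairScoreB cs (PySem.List.index? ALL_STAGES cs)) = vs.map (pairScore cs) := by
    simp [pairScore]
  simp only [stage_score_alt]
  rw [h, best_eq_Mval]

-- for each concrete company-stage index, the pairwise-70 test IS A's adjacency test
theorem pair70_eq_adjA (ci : Int) (cs : String)
    (hc : ci = 0 ∧ cs = "Pre-Seed" ∨ ci = 1 ∧ cs = "Seed" ∨
          ci = 2 ∧ cs = "Series A" ∨ ci = 3 ∧ cs = "Series B+")
    (st : String) : (pairScore cs st == 70) = adjA ci st := by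
  have e0 : PySem.List.index? ALL_STAGES "Pre-Seed" = some 0 := by decide
  have e1 : PySem.List.index? ALL_STAGES "Seed" = some 1 := by decide
  have e2 : PySem.List.index? ALL_STAGES "Series A" = some 2 := by decide
  have e3 : PySem.List.index? ALL_STAGES "Series B+" = some 3 := by decide
  unfold pairScore pairScoreB adjA
  rw [get_idxA st, index_ALL st]
  rcases hc with ⟨rfl, rfl⟩ | ⟨rfl, rfl⟩ | ⟨rfl, rfl⟩ | ⟨rfl, rfl⟩ <;>
    simp only [e0, e1, e2, e3] <;>
    by_cases h1 : st = "Pre-Seed" <;> by_cases h2 : st = "Seed" <;>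
    by_cases h3 : st = "Series A" <;> by_cases h4 : st = "Series B+" <;>
    simp_all [ALL_STAGES] <;> split_ifs <;> simp

theorem pair70_unknown (cs : String) (hn : PySem.List.index? ALL_STAGES cs = none)
    (st : String) : (pairScore cs st == 70) = false := by
  unfold pairScore pairScoreB
  rw [hn]
  by_cases h : cs = st <;> simp [h]

-- ===== VERDICT (by name: the statement is the Claim_ definition above) =====
theorem stage_score_spec : Claim_equal_stage_score := by
  intro cs vs _
  unfold Spec_stage_score
  rw [alt_eq]
  unfold stage_score
  by_cases h1 : cs ∈ vs
  · have hM : Mval cs vs = 100 := by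
      unfold Mval
      have : vs.any (fun st => cs == st) = true := List.any_eq_true.2 ⟨cs, h1, beq_self_eq_true cs⟩
      simp [this]
    simp [h1, hM]
    rfl
  · have hanyP : vs.any (fun st => cs == st) = false := by
      rw [List.any_eq_false]
      intro st hst hbeq
      exact h1 (beq_iff_eq.1 hbeq ▸ hst)
    have hcont : vs.contains cs = false := by
      simp [List.contains_eq_mem, h1]
    simp only [hcont, Bool.false_eq_true, if_false]
    by_cases hk : cs = "Pre-Seed" ∨ cs = "Seed" ∨ cs = "Series A" ∨ cs = "Series B+"
    · obtain ⟨ci, hci, hc⟩ : ∃ ci, idxA.get? cs = some ci ∧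
        (ci = 0 ∧ cs = "Pre-Seed" ∨ ci = 1 ∧ cs = "Seed" ∨
         ci = 2 ∧ cs = "Series A" ∨ ci = 3 ∧ cs = "Series B+") := by
        rcases hk with h | h | h | h <;> subst h
        · exact ⟨0, by decide, by simp⟩
        · exact ⟨1, by decide, by simp⟩
        · exact ⟨2, by decide, by simp⟩
        · exact ⟨3, by decide, by simp⟩
      rw [hci]
      dsimp only
      rw [stageLoopA_eq]
      have hfun : (fun st => pairScore cs st == 70) = adjA ci := funext (pair70_eq_adjA ci cs hc)
      have hM : Mval cs vs = if vs.any (adjA ci) then 70 else 40 := by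
        unfold Mval
        rw [hanyP, hfun]
        simp
      by_cases hadj : vs.any (adjA ci) = true
      · simp [hadj, hM]; rfl
      · simp only [Bool.not_eq_true] at hadj
        simp [hadj, hM]; rfl
    · push Not at hk
      obtain ⟨k1, k2, k3, k4⟩ := hk
      have hci : idxA.get? cs = none := by rw [get_idxA]; simp [k1, k2, k3, k4]
      have hn : PySem.List.index? ALL_STAGES cs = none := by
        rw [index_ALL]; simp [k1, k2, k3, k4]
      have hM : Mval cs vs = 40 := by
        unfold Mval
        rw [hanyP]
        have : (fun st => pairScore cs st == 70) = fun _ => false := funext (pair70_unknown cs hn)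
        rw [this]
        simp
      simp [hci, hM]
      rfl
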